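-- pv_equiv track=rewrite | github.com/biosvos/algorithm | 프로그래머스/[1차] 뉴스 클러스터링/main.py | jaccard_string_iter
-- ===== SOURCE A (Python) =====
-- def jaccard_string_iter(s: str):
--     prev = ""
--     for ch in s:
--         if not ch.isalpha():
--             prev = ""
--             continue
--
--         if prev != "":
--             yield (prev + ch).lower()
--
--         prev = ch
-- ===== SOURCE B (Python) =====
-- def _runs(s):
--     runs = []
--     cur = ""
--     for ch in s:
--         if ch.isalpha():
--             cur += ch
--         else:
--             if cur:
--                 runs.append(cur)
--             cur = ""
--     if cur:
--         runs.append(cur)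
--     return runs
--
--
-- def _bigrams(w):
--     return [w[i:i + 2] for i in range(len(w) - 1)]
--
--
-- def jaccard_string_iter(s: str):
--     for run in _runs(s):
--         for bg in _bigrams(run.lower()):
--             yield bg
-- ===== Notes on version B (the rewrite author's own statement) =====
-- stated objective: alternative
-- what changed: Replaces A's single-pass reset-on-non-alpha prev state machine with a staged pipeline: first split the string into maximal alphabetic runs, then lowercase each run and list its bigrams as length-2 slices w[i:i+2] over an index range.
import Mathlib
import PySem

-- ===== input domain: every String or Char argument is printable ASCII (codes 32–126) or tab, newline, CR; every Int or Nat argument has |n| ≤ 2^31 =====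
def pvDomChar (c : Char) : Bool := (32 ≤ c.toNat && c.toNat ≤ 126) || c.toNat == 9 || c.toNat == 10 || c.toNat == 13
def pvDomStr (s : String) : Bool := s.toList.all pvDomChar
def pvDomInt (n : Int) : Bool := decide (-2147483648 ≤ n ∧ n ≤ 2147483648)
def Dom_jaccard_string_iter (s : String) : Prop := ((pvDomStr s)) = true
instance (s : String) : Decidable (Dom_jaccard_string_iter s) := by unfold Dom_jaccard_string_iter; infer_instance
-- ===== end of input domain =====

-- B replaces A's single-pass reset-on-non-alpha state machine with a staged pipeline: split into maximal alphabetic runs, then list the slice bigrams of each lowered run (alternative decomposition, same O(n) cost).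


-- ===== PORT A =====
-- A's generator: running `prev` state, reset to "" on non-alpha; structural recursion over the chars.
def jaccardLoopA (prev : Option Char) (l : List Char) : List String :=
  match l with
  | [] => []
  | ch :: rest =>
    if ¬ PySem.Chars.isalpha ch then jaccardLoopA none rest
    else
      match prev with
      | some p => PySem.Str.lower (String.ofList [p, ch]) :: jaccardLoopA (some ch) rest
      | none => jaccardLoopA (some ch) rest

def jaccard_string_iter (s : String) : List String :=
  jaccardLoopA none s.toList

-- ===== PORT B =====
-- B stage 1 (`_runs`): loop accumulating the current alphabetic run `cur`, flushing it into `runs` at each non-alpha char and at the end.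
def runsLoopB (runs : List (List Char)) (cur : List Char) (l : List Char) : List (List Char) :=
  match l with
  | [] => if cur ≠ [] then runs ++ [cur] else runs
  | ch :: rest =>
    if PySem.Chars.isalpha ch then runsLoopB runs (cur ++ [ch]) rest
    else if cur ≠ [] then runsLoopB (runs ++ [cur]) [] rest
    else runsLoopB runs [] rest

-- B stage 2 (`_bigrams`): [w[i:i+2] for i in range(len(w) - 1)]
def bigramsB (w : String) : List String :=
  (PySem.List.pyRange 0 (PySem.Str.len w - 1) 1).map
    (fun i => PySem.Str.slice w (some i) (some (i + 2)))

def jaccard_string_iter_alt (s : String) : List String :=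
  (runsLoopB [] [] s.toList).flatMap
    (fun run => bigramsB (PySem.Str.lower (String.ofList run)))

-- ===== PRECONDITION & SPEC =====
def Spec_jaccard_string_iter (s : String) (out : List String) : Prop := out = jaccard_string_iter_alt s
instance (s : String) (out : List String) : Decidable (Spec_jaccard_string_iter s out) := by unfold Spec_jaccard_string_iter; infer_instance

-- ===== CLAIM (what is proved, stated in full; the proofs are below) =====
def Claim_equal_jaccard_string_iter : Prop := ∀ (s : String), Dom_jaccard_string_iter s → Spec_jaccard_string_iter s (jaccard_string_iter s)

-- ===== LEMMAS AND PROOFS =====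
-- recursive characterisation of stage 2, used only by the proof
def bigRec (w : List Char) : List String :=
  match w with
  | a :: b :: rest => String.ofList [a, b] :: bigRec (b :: rest)
  | _ => []

-- bigrams of the per-char-lowered list
def bigLow (xs : List Char) : List String := bigRec (xs.map PySem.Chars.lowerChar)

def flatBig (rs : List (List Char)) : List String := rs.flatMap bigLow

theorem lower_ofList (l : List Char) :
    PySem.Str.lower (String.ofList l) = String.ofList (l.map PySem.Chars.lowerChar) :=
  String.toList_injective (by simp [PySem.Chars.lower])

theorem lower_pair (p ch : Char) :
    PySem.Str.lower (String.ofList [p, ch]) =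
      String.ofList [PySem.Chars.lowerChar p, PySem.Chars.lowerChar ch] :=
  lower_ofList [p, ch]

theorem range_map_slice_eq_bigRec (l : List Char) :
    (List.range (l.length - 1)).map (fun k => String.ofList ((l.drop k).take 2)) = bigRec l := by
  induction l with
  | nil => rfl
  | cons a t ih =>
    cases t with
    | nil => rfl
    | cons b t2 =>
      have hlen : (a :: b :: t2).length - 1 = (b :: t2).length - 1 + 1 := by
        simp [List.length_cons]
      rw [hlen, List.range_succ_eq_map, List.map_cons, List.map_map]
      have hmap : ((List.range ((b :: t2).length - 1)).map
          ((fun k => String.ofList (((a :: b :: t2).drop k).take 2)) ∘ Nat.succ)) =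
          (List.range ((b :: t2).length - 1)).map
            (fun k => String.ofList (((b :: t2).drop k).take 2)) := by
        apply List.map_congr_left
        intro k _
        simp [Function.comp, List.drop_succ_cons]
      rw [hmap, ih]
      rfl

theorem bigramsB_eq_bigRec (l : List Char) : bigramsB (String.ofList l) = bigRec l := by
  unfold bigramsB
  have hlen : PySem.Str.len (String.ofList l) = (l.length : Int) := by
    simp [PySem.Str.len]
  rw [hlen]
  have hr : PySem.List.pyRange 0 ((l.length : Int) - 1) 1 =
      (List.range (l.length - 1)).map (fun k => Int.ofNat k) := by
    rw [PySem.List.pyRange_one]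
    have : (((l.length : Int) - 1) - 0).toNat = l.length - 1 := by omega
    rw [this]
    apply List.map_congr_left
    intro k _
    simp [Int.ofNat_eq_natCast]
  rw [hr, List.map_map]
  rw [← range_map_slice_eq_bigRec l]
  apply List.map_congr_left
  intro k _
  simp only [Function.comp, Int.ofNat_eq_natCast]
  apply String.toList_injective
  have h2 : ((k : Int) + 2) = ((k + 2 : Nat) : Int) := by push_cast; ring
  simp only [PySem.Str.toList_slice, PySem.Chars.slice_eq_listSlice, h2]
  rw [show (PySem.List.slice (String.ofList l).toList (some ((k : Nat) : Int)) (some (((k + 2 : Nat) : Int)))) = (((String.ofList l).toList.drop k).take ((k + 2) - k)) from PySem.List.slice_natCast _ _ _]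
  simp

theorem runsLoopB_acc (l : List Char) : ∀ (rs : List (List Char)) (cur : List Char),
    runsLoopB rs cur l = rs ++ runsLoopB [] cur l := by
  induction l with
  | nil => intro rs cur; by_cases h : cur = [] <;> simp [runsLoopB, h]
  | cons ch rest ih =>
    intro rs cur
    by_cases ha : PySem.Chars.isalpha ch
    · simp only [runsLoopB, ha, if_pos]
      exact ih rs (cur ++ [ch])
    · by_cases hc : cur = []
      · subst hc
        simp only [runsLoopB, ha]
        simpa using ih rs []
      · simp only [runsLoopB, ha]
        simp only [ne_eq, hc, not_false_eq_true, if_true, Bool.false_eq_true, if_false]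
        rw [ih (rs ++ [cur]) [], ih ([] ++ [cur]) []]
        simp

theorem bigrams_snoc (xs : List Char) (ch : Char) :
    bigRec (xs ++ [ch]) = bigRec xs ++
      (match xs.getLast? with
       | none => []
       | some p => [String.ofList [p, ch]]) := by
  induction xs with
  | nil => rfl
  | cons x t ih =>
    cases t with
    | nil => rfl
    | cons y t2 =>
      simp only [List.cons_append, bigRec]
      simp only [List.cons_append] at ih
      rw [ih]
      simp [List.getLast?_cons_cons]

theorem runs_eq_loopA (l : List Char) : ∀ (cur : List Char),
    flatBig (runsLoopB [] cur l) = bigLow cur ++ jaccardLoopA cur.getLast? l := by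
  induction l with
  | nil =>
    intro cur
    by_cases h : cur = [] <;> simp [runsLoopB, h, flatBig, jaccardLoopA, bigLow, bigRec]
  | cons ch rest ih =>
    intro cur
    by_cases ha : PySem.Chars.isalpha ch
    · have hL : runsLoopB [] cur (ch :: rest) = runsLoopB [] (cur ++ [ch]) rest := by
        simp [runsLoopB, ha]
      rw [hL, ih (cur ++ [ch])]
      have hlast : (cur ++ [ch]).getLast? = some ch := by simp
      rw [hlast]
      have hbig : bigLow (cur ++ [ch]) = bigLow cur ++
          (match cur.getLast? with
           | none => []
           | some p => [String.ofList [PySem.Chars.lowerChar p, PySem.Chars.lowerChar ch]]) := by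
        unfold bigLow
        rw [List.map_append, List.map_singleton, bigrams_snoc]
        rw [List.getLast?_map]
        cases cur.getLast? <;> rfl
      rw [hbig]
      cases hc : cur.getLast? with
      | none =>
        have : cur = [] := List.getLast?_eq_none_iff.mp hc
        subst this
        simp [jaccardLoopA, ha]
      | some p =>
        have hA : jaccardLoopA (some p) (ch :: rest) =
            PySem.Str.lower (String.ofList [p, ch]) :: jaccardLoopA (some ch) rest := by
          simp [jaccardLoopA, ha]
        rw [hA, lower_pair]
        simp
    · have hA : jaccardLoopA cur.getLast? (ch :: rest) = jaccardLoopA none rest := by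
        cases cur.getLast? <;> simp [jaccardLoopA, ha]
      rw [hA]
      by_cases hc : cur = []
      · subst hc
        have hL : runsLoopB [] [] (ch :: rest) = runsLoopB [] [] rest := by
          simp [runsLoopB, ha]
        rw [hL]
        have hrec := ih []
        rw [List.getLast?_nil] at hrec
        rw [hrec]
      · have hL : runsLoopB [] cur (ch :: rest) = [cur] ++ runsLoopB [] [] rest := by
          simp only [runsLoopB, ha]
          simp only [ne_eq, hc, not_false_eq_true, if_true, Bool.false_eq_true, if_false]
          exact runsLoopB_acc rest [cur] []
        rw [hL]
        have hrec := ih []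
        rw [List.getLast?_nil] at hrec
        simp only [flatBig, bigLow, List.map_nil, bigRec, List.nil_append] at hrec
        simp [flatBig, hrec]

-- ===== VERDICT (by name: the statement is the Claim_ definition above) =====
theorem jaccard_string_iter_spec : Claim_equal_jaccard_string_iter := by
  intro s _
  unfold Spec_jaccard_string_iter jaccard_string_iter jaccard_string_iter_alt
  have halt : (runsLoopB [] [] s.toList).flatMap
      (fun run => bigramsB (PySem.Str.lower (String.ofList run))) =
      flatBig (runsLoopB [] [] s.toList) := by
    unfold flatBig
    apply List.flatMap_congr
    intro run _
    rw [lower_ofList, bigramsB_eq_bigRec]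
    rfl
  rw [halt]
  have h := runs_eq_loopA s.toList []
  rw [List.getLast?_nil] at h
  simp only [bigLow, List.map_nil, bigRec, List.nil_append] at h
  exact h.symm
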